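-- pv_equiv track=rewrite | github.com/nabokovvv/brainy | wikidata_mapper.py | _get_priority_tier
-- ===== SOURCE A (Python) =====
-- SPACY_LABEL_TO_WIKIDATA_P31 = {
--     "PERSON": {
--         "high": ["Q5"],  # human
--         "medium": ["Q15632617", "Q95074"],  # fictional human, mythological character
--         "low": ["Q4271324"]  # mythical character
--     },
--     "ORG": {
--         "high": ["Q6881511", "Q4830453", "Q783794", "Q2085381", "Q4438121"],  # enterprise, business, company, publisher, sports org
--         "medium": ["Q43229", "Q7210356", "Q15265344"],  # organization, political org, broadcasting org
--         "low": ["Q16917", "Q685"]  # hospital, library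
--     },
--     "GPE": {
--         "high": ["Q6256", "Q3624078", "Q515", "Q10864048", "Q15284"],  # country, sovereign state, city, constituent state, municipality
--         "medium": ["Q28575", "Q82794"],  # county, geographic region
--         "low": ["Q2221906"]  # geographic location (generic)
--     },
--     "LOC": {
--         "high": ["Q515", "Q486972", "Q6256", "Q82794", "Q10864048"],  # city, human settlement, country, geographic region, constituent state
--         "medium": ["Q23442", "Q4022", "Q8502", "Q13218391", "Q5107"],  # island, river, mountain, historical country, continent
--         "low": ["Q2221906", "Q618123"]  # geographic location, geographical object (generic)
--     },
--     "FAC": {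
--         "high": ["Q811979", "Q13226383"],  # architectural structure, facility
--         "medium": [],
--         "low": []
--     },
--     "PRODUCT": {
--         "high": ["Q40056", "Q7397", "Q571", "Q11424", "Q134556"],  # software, video game, book, film, single
--         "medium": ["Q2424752", "Q47461344"],  # product, written work
--         "low": ["Q24229398"]  # manufactured good
--     },
--     "EVENT": {
--         "high": ["Q198", "Q18608583", "Q350604"],  # war, recurring event, armed conflict
--         "medium": ["Q1190554", "Q46847"],  # event, disaster
--         "low": ["Q1656682"]  # occurrence
--     },
--     "WORK_OF_ART": {
--         "high": ["Q3305213", "Q860861", "Q207628", "Q11424"],  # painting, sculpture, musical composition, film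
--         "medium": ["Q838948"],  # work of art
--         "low": ["Q17537576"]  # creative work
--     },
--     "LAW": {
--         "high": ["Q828101"],  # law
--         "medium": [],
--         "low": []
--     },
--     "NORP": {
--         "high": ["Q41710", "Q7278"],  # ethnic group, political party
--         "medium": ["Q16334295", "Q9174"],  # human group, religion
--         "low": []
--     },
--     "MISC": {
--         "high": ["Q12136", "Q16521", "Q11173", "Q7187", "Q811430", "Q483247"],  # disease, taxon, chemical compound, gene, construction, phenomenon
--         "medium": ["Q151885", "Q1047113"],  # concept, specialty
--         "low": ["Q35120", "Q58778"]  # entity (very broad), system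
--     }
-- }
--
-- def _get_priority_tier(p31_values: list[str], spacy_label: str) -> tuple[str | None, list[str]]:
--     """Determines the priority tier of an entity based on its P31 values.
--
--     Returns:
--         tuple: (priority_tier, matched_qids) where priority_tier is 'high', 'medium', 'low', or None
--     """
--     if spacy_label not in SPACY_LABEL_TO_WIKIDATA_P31:
--         return (None, [])
--
--     priority_map = SPACY_LABEL_TO_WIKIDATA_P31[spacy_label]
--
--     # Check high priority first
--     high_matches = [qid for qid in p31_values if qid in priority_map.get('high', [])]
--     if high_matches:
--         return ('high', high_matches)
--
--     # Check medium priority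
--     medium_matches = [qid for qid in p31_values if qid in priority_map.get('medium', [])]
--     if medium_matches:
--         return ('medium', medium_matches)
--
--     # Check low priority
--     low_matches = [qid for qid in p31_values if qid in priority_map.get('low', [])]
--     if low_matches:
--         return ('low', low_matches)
--
--     return (None, [])
-- ===== SOURCE B (Python) =====
-- _TIER_LISTS = {
--     "PERSON": [["Q5"], ["Q15632617", "Q95074"], ["Q4271324"]],
--     "ORG": [["Q6881511", "Q4830453", "Q783794", "Q2085381", "Q4438121"],
--             ["Q43229", "Q7210356", "Q15265344"], ["Q16917", "Q685"]],
--     "GPE": [["Q6256", "Q3624078", "Q515", "Q10864048", "Q15284"],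
--             ["Q28575", "Q82794"], ["Q2221906"]],
--     "LOC": [["Q515", "Q486972", "Q6256", "Q82794", "Q10864048"],
--             ["Q23442", "Q4022", "Q8502", "Q13218391", "Q5107"],
--             ["Q2221906", "Q618123"]],
--     "FAC": [["Q811979", "Q13226383"], [], []],
--     "PRODUCT": [["Q40056", "Q7397", "Q571", "Q11424", "Q134556"],
--                 ["Q2424752", "Q47461344"], ["Q24229398"]],
--     "EVENT": [["Q198", "Q18608583", "Q350604"], ["Q1190554", "Q46847"], ["Q1656682"]],
--     "WORK_OF_ART": [["Q3305213", "Q860861", "Q207628", "Q11424"],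
--                     ["Q838948"], ["Q17537576"]],
--     "LAW": [["Q828101"], [], []],
--     "NORP": [["Q41710", "Q7278"], ["Q16334295", "Q9174"], []],
--     "MISC": [["Q12136", "Q16521", "Q11173", "Q7187", "Q811430", "Q483247"],
--              ["Q151885", "Q1047113"], ["Q35120", "Q58778"]],
-- }
--
-- _TIER_NAMES = ("high", "medium", "low")
--
--
-- def _rank(tier_lists, qid):
--     """Index of the first tier list containing qid, or None."""
--     if not tier_lists:
--         return None
--     if qid in tier_lists[0]:
--         return 0
--     r = _rank(tier_lists[1:], qid)
--     return None if r is None else r + 1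
--
--
-- def _get_priority_tier(p31_values: list[str], spacy_label: str) -> tuple[str | None, list[str]]:
--     """Rank every qid once (0=high,1=medium,2=low), take the best rank present,
--     and keep exactly the qids achieving it."""
--     tiers = _TIER_LISTS.get(spacy_label)
--     if tiers is None:
--         return (None, [])
--     ranks = [_rank(tiers, q) for q in p31_values]
--     best = min((r for r in ranks if r is not None), default=None)
--     if best is None:
--         return (None, [])
--     return (_TIER_NAMES[best], [q for q, r in zip(p31_values, ranks) if r == best])
-- ===== Notes on version B (the rewrite author's own statement) =====
-- stated objective: alternative
-- what changed: Replaces A's three staged membership-filter passes (high, then medium, then low, each with an early return) by ranking every qid once against a label-to-tier-lists table (0=high,1=medium,2=low), taking the minimum rank present, and keeping the qids that achieve it.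
import Mathlib
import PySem

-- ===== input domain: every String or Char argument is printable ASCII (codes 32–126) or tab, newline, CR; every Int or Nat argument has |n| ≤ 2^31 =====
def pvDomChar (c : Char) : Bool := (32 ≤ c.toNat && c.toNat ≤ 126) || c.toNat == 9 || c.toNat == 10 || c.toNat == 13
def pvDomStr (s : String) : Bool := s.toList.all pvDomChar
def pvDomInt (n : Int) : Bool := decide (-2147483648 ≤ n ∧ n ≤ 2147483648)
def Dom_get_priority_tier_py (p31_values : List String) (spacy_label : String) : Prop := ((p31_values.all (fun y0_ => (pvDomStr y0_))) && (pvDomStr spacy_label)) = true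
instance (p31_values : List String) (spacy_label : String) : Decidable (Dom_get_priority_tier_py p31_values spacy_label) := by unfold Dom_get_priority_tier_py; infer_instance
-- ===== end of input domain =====

-- B replaces A's three staged membership-filter passes by ranking every qid once
-- (0 = high, 1 = medium, 2 = low), taking the minimum rank present, and keeping the
-- qids that achieve it (objective: alternative).

-- ===== PORT A =====
-- the module-level SPACY_LABEL_TO_WIKIDATA_P31 table, as A's nested dict
def pv_spacy_map : PySem.Dict String (PySem.Dict String (List String)) := PySem.Dict.ofList [
  ("PERSON", PySem.Dict.ofList [("high", ["Q5"]), ("medium", ["Q15632617", "Q95074"]), ("low", ["Q4271324"])]),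
  ("ORG", PySem.Dict.ofList [("high", ["Q6881511", "Q4830453", "Q783794", "Q2085381", "Q4438121"]), ("medium", ["Q43229", "Q7210356", "Q15265344"]), ("low", ["Q16917", "Q685"])]),
  ("GPE", PySem.Dict.ofList [("high", ["Q6256", "Q3624078", "Q515", "Q10864048", "Q15284"]), ("medium", ["Q28575", "Q82794"]), ("low", ["Q2221906"])]),
  ("LOC", PySem.Dict.ofList [("high", ["Q515", "Q486972", "Q6256", "Q82794", "Q10864048"]), ("medium", ["Q23442", "Q4022", "Q8502", "Q13218391", "Q5107"]), ("low", ["Q2221906", "Q618123"])]),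
  ("FAC", PySem.Dict.ofList [("high", ["Q811979", "Q13226383"]), ("medium", []), ("low", [])]),
  ("PRODUCT", PySem.Dict.ofList [("high", ["Q40056", "Q7397", "Q571", "Q11424", "Q134556"]), ("medium", ["Q2424752", "Q47461344"]), ("low", ["Q24229398"])]),
  ("EVENT", PySem.Dict.ofList [("high", ["Q198", "Q18608583", "Q350604"]), ("medium", ["Q1190554", "Q46847"]), ("low", ["Q1656682"])]),
  ("WORK_OF_ART", PySem.Dict.ofList [("high", ["Q3305213", "Q860861", "Q207628", "Q11424"]), ("medium", ["Q838948"]), ("low", ["Q17537576"])]),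
  ("LAW", PySem.Dict.ofList [("high", ["Q828101"]), ("medium", []), ("low", [])]),
  ("NORP", PySem.Dict.ofList [("high", ["Q41710", "Q7278"]), ("medium", ["Q16334295", "Q9174"]), ("low", [])]),
  ("MISC", PySem.Dict.ofList [("high", ["Q12136", "Q16521", "Q11173", "Q7187", "Q811430", "Q483247"]), ("medium", ["Q151885", "Q1047113"]), ("low", ["Q35120", "Q58778"])])]

def get_priority_tier_py (p31_values : List String) (spacy_label : String) : Option String × List String :=
  -- 'if spacy_label not in MAP: return (None, [])' followed by 'MAP[spacy_label]' = one lookup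
  match pv_spacy_map.get? spacy_label with
  | none => (none, [])
  | some priority_map =>
    let high_matches := p31_values.filter (fun qid => decide (qid ∈ priority_map.getD "high" []))
    if high_matches ≠ [] then (some "high", high_matches)
    else
      let medium_matches := p31_values.filter (fun qid => decide (qid ∈ priority_map.getD "medium" []))
      if medium_matches ≠ [] then (some "medium", medium_matches)
      else
        let low_matches := p31_values.filter (fun qid => decide (qid ∈ priority_map.getD "low" []))
        if low_matches ≠ [] then (some "low", low_matches)
        else (none, [])

-- ===== PORT B =====
-- B's own constant _TIER_LISTS: label ↦ the three tier lists in priority order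
def pvB_table : List (String × List (List String)) := [
  ("PERSON", [["Q5"], ["Q15632617", "Q95074"], ["Q4271324"]]),
  ("ORG", [["Q6881511", "Q4830453", "Q783794", "Q2085381", "Q4438121"], ["Q43229", "Q7210356", "Q15265344"], ["Q16917", "Q685"]]),
  ("GPE", [["Q6256", "Q3624078", "Q515", "Q10864048", "Q15284"], ["Q28575", "Q82794"], ["Q2221906"]]),
  ("LOC", [["Q515", "Q486972", "Q6256", "Q82794", "Q10864048"], ["Q23442", "Q4022", "Q8502", "Q13218391", "Q5107"], ["Q2221906", "Q618123"]]),
  ("FAC", [["Q811979", "Q13226383"], [], []]),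
  ("PRODUCT", [["Q40056", "Q7397", "Q571", "Q11424", "Q134556"], ["Q2424752", "Q47461344"], ["Q24229398"]]),
  ("EVENT", [["Q198", "Q18608583", "Q350604"], ["Q1190554", "Q46847"], ["Q1656682"]]),
  ("WORK_OF_ART", [["Q3305213", "Q860861", "Q207628", "Q11424"], ["Q838948"], ["Q17537576"]]),
  ("LAW", [["Q828101"], [], []]),
  ("NORP", [["Q41710", "Q7278"], ["Q16334295", "Q9174"], []]),
  ("MISC", [["Q12136", "Q16521", "Q11173", "Q7187", "Q811430", "Q483247"], ["Q151885", "Q1047113"], ["Q35120", "Q58778"]])]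

-- _TIER_LISTS.get(spacy_label) (first match in the association list)
def pvB_lookup (s : String) : Option (List (List String)) :=
  (pvB_table.find? (fun e => e.1 == s)).map Prod.snd

-- _rank: index of the first tier list containing qid, or None (Source B's recursion)
def pvB_rank : List (List String) → String → Option Nat
  | [], _ => none
  | t :: ts, q => if q ∈ t then some 0 else (pvB_rank ts q).map (· + 1)

def get_priority_tier_py_alt (p31_values : List String) (spacy_label : String) : Option String × List String :=
  match pvB_lookup spacy_label with
  | none => (none, [])
  | some tiers =>
    let ranks := p31_values.map (pvB_rank tiers)
    -- min((r for r in ranks if r is not None), default=None)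
    match PySem.List.min? (ranks.filterMap id) (fun r => r) with
    | none => (none, [])
    | some best =>
      -- _TIER_NAMES[best]: best < 3 always since a rank indexes a 3-element tier list
      (some (["high", "medium", "low"].getD best ""),
       ((p31_values.zip ranks).filter (fun qr => qr.2 == some best)).map Prod.fst)

-- ===== PRECONDITION & SPEC =====
def Spec_get_priority_tier_py (p31_values : List String) (spacy_label : String) (out : Option String × List String) : Prop := out = get_priority_tier_py_alt p31_values spacy_label
instance (p31_values : List String) (spacy_label : String) (out : Option String × List String) : Decidable (Spec_get_priority_tier_py p31_values spacy_label out) := by unfold Spec_get_priority_tier_py; infer_instance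

-- ===== CLAIM =====
def Claim_equal_get_priority_tier_py : Prop := ∀ (p31_values : List String) (spacy_label : String), Dom_get_priority_tier_py p31_values spacy_label → Spec_get_priority_tier_py p31_values spacy_label (get_priority_tier_py p31_values spacy_label)

-- ===== LEMMAS AND PROOFS =====

-- B's lookup agrees with A's: same keys in the same order, values related by getD on the tier names
theorem pv_lookup_eq (s : String) :
    pvB_lookup s = (pv_spacy_map.get? s).map
      (fun pm => [pm.getD "high" [], pm.getD "medium" [], pm.getD "low" []]) := by
  by_cases h1 : s = "PERSON"; · subst h1; rfl
  by_cases h2 : s = "ORG"; · subst h2; rfl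
  by_cases h3 : s = "GPE"; · subst h3; rfl
  by_cases h4 : s = "LOC"; · subst h4; rfl
  by_cases h5 : s = "FAC"; · subst h5; rfl
  by_cases h6 : s = "PRODUCT"; · subst h6; rfl
  by_cases h7 : s = "EVENT"; · subst h7; rfl
  by_cases h8 : s = "WORK_OF_ART"; · subst h8; rfl
  by_cases h9 : s = "LAW"; · subst h9; rfl
  by_cases h10 : s = "NORP"; · subst h10; rfl
  by_cases h11 : s = "MISC"; · subst h11; rfl
  have e1 : (("PERSON" : String) == s) = false := beq_eq_false_iff_ne.mpr (Ne.symm h1)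
  have e2 : (("ORG" : String) == s) = false := beq_eq_false_iff_ne.mpr (Ne.symm h2)
  have e3 : (("GPE" : String) == s) = false := beq_eq_false_iff_ne.mpr (Ne.symm h3)
  have e4 : (("LOC" : String) == s) = false := beq_eq_false_iff_ne.mpr (Ne.symm h4)
  have e5 : (("FAC" : String) == s) = false := beq_eq_false_iff_ne.mpr (Ne.symm h5)
  have e6 : (("PRODUCT" : String) == s) = false := beq_eq_false_iff_ne.mpr (Ne.symm h6)
  have e7 : (("EVENT" : String) == s) = false := beq_eq_false_iff_ne.mpr (Ne.symm h7)
  have e8 : (("WORK_OF_ART" : String) == s) = false := beq_eq_false_iff_ne.mpr (Ne.symm h8)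
  have e9 : (("LAW" : String) == s) = false := beq_eq_false_iff_ne.mpr (Ne.symm h9)
  have e10 : (("NORP" : String) == s) = false := beq_eq_false_iff_ne.mpr (Ne.symm h10)
  have e11 : (("MISC" : String) == s) = false := beq_eq_false_iff_ne.mpr (Ne.symm h11)
  have hA : pv_spacy_map.get? s = none := by
    have hf : pv_spacy_map.items.find? (fun p => p.1 == s) = none := by
      rw [List.find?_eq_none]
      intro p hp
      have ha : p.1 ∈ pv_spacy_map.items.map Prod.fst := List.mem_map.mpr ⟨p, hp, rfl⟩
      rw [show pv_spacy_map.items.map Prod.fst =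
        ["PERSON", "ORG", "GPE", "LOC", "FAC", "PRODUCT", "EVENT", "WORK_OF_ART", "LAW", "NORP", "MISC"] from rfl] at ha
      simp only [List.mem_cons, List.not_mem_nil, or_false] at ha
      simp only [beq_iff_eq]
      rcases ha with e|e|e|e|e|e|e|e|e|e|e <;> rw [e] <;>
        first
        | exact fun w => h1 w.symm
        | exact fun w => h2 w.symm
        | exact fun w => h3 w.symm
        | exact fun w => h4 w.symm
        | exact fun w => h5 w.symm
        | exact fun w => h6 w.symm
        | exact fun w => h7 w.symm
        | exact fun w => h8 w.symm
        | exact fun w => h9 w.symm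
        | exact fun w => h10 w.symm
        | exact fun w => h11 w.symm
    simp [PySem.Dict.get?, hf]
  have hB : pvB_lookup s = none := by
    simp [pvB_lookup, pvB_table, List.find?, e1, e2, e3, e4, e5, e6, e7, e8, e9, e10, e11]
  rw [hA, hB]
  rfl

-- pvB_rank on a three-tier list, in closed form
theorem pvB_rank_three (h m l : List String) (q : String) :
    pvB_rank [h, m, l] q =
      if q ∈ h then some 0 else if q ∈ m then some 1 else if q ∈ l then some 2 else none := by
  by_cases h1 : q ∈ h <;> by_cases h2 : q ∈ m <;> by_cases h3 : q ∈ l <;>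
    simp [pvB_rank, h1, h2, h3]

-- projecting the zip-with-ranks filter back to a plain filter on the inputs
theorem pv_zip_filter (xs : List String) (f : String → Option Nat) (v : Nat) :
    ((xs.zip (xs.map f)).filter (fun qr => qr.2 == some v)).map Prod.fst =
      xs.filter (fun q => f q == some v) := by
  induction xs with
  | nil => rfl
  | cons x xs ih =>
    simp only [List.map_cons, List.zip_cons_cons, List.filter_cons]
    by_cases hv : f x = some v <;> simp [hv, ih]

-- min? of a Nat list is any member that bounds the list below
theorem pv_min_eq (ys : List Nat) (k : Nat) (hk : k ∈ ys) (hle : ∀ y ∈ ys, k ≤ y) :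
    PySem.List.min? ys (fun r => r) = some k := by
  cases hm : PySem.List.min? ys (fun r => r) with
  | none => rw [PySem.List.min?_eq_none_iff] at hm; subst hm; cases hk
  | some m =>
    have h1 := PySem.List.min?_mem hm
    have h2 := PySem.List.min?_isMin hm k hk
    have h3 := hle m h1
    have h4 : m ≤ k := by simpa using h2
    rw [Nat.le_antisymm h4 h3]

-- membership in the list of defined ranks
theorem pv_mem_ranks (xs : List String) (f : String → Option Nat) (r : Nat) :
    r ∈ (xs.map f).filterMap id ↔ ∃ q ∈ xs, f q = some r := by
  simp [List.mem_filterMap]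

-- the generic core: A's three staged filters = B's rank-min-keep, for any three tier lists
theorem pv_core (h m l : List String) (p31 : List String) :
    (let high_matches := p31.filter (fun qid => decide (qid ∈ h))
     if high_matches ≠ [] then ((some "high" : Option String), high_matches)
     else
       let medium_matches := p31.filter (fun qid => decide (qid ∈ m))
       if medium_matches ≠ [] then (some "medium", medium_matches)
       else
         let low_matches := p31.filter (fun qid => decide (qid ∈ l))
         if low_matches ≠ [] then (some "low", low_matches)
         else (none, [])) =
    (let ranks := p31.map (pvB_rank [h, m, l])
     match PySem.List.min? (ranks.filterMap id) (fun r => r) with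
     | none => (none, [])
     | some best =>
       (some (["high", "medium", "low"].getD best ""),
        ((p31.zip ranks).filter (fun qr => qr.2 == some best)).map Prod.fst)) := by
  simp only []
  by_cases hH : p31.filter (fun qid => decide (qid ∈ h)) = []
  · have hnH : ∀ q ∈ p31, q ∉ h := by
      intro q hq hmem
      have : q ∈ p31.filter (fun qid => decide (qid ∈ h)) :=
        List.mem_filter.mpr ⟨hq, by simpa using hmem⟩
      simp [hH] at this
    by_cases hM : p31.filter (fun qid => decide (qid ∈ m)) = []
    · have hnM : ∀ q ∈ p31, q ∉ m := by
        intro q hq hmem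
        have : q ∈ p31.filter (fun qid => decide (qid ∈ m)) :=
          List.mem_filter.mpr ⟨hq, by simpa using hmem⟩
        simp [hM] at this
      by_cases hL : p31.filter (fun qid => decide (qid ∈ l)) = []
      · -- nothing matches anywhere: every rank is none
        have hnL : ∀ q ∈ p31, q ∉ l := by
          intro q hq hmem
          have : q ∈ p31.filter (fun qid => decide (qid ∈ l)) :=
            List.mem_filter.mpr ⟨hq, by simpa using hmem⟩
          simp [hL] at this
        have hnil : (p31.map (pvB_rank [h, m, l])).filterMap id = [] := by
          rw [List.filterMap_eq_nil_iff]
          intro a ha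
          obtain ⟨q, hq, rfl⟩ := List.mem_map.mp ha
          simp [pvB_rank_three, hnH q hq, hnM q hq, hnL q hq]
        simp only [List.filterMap_map, Function.comp, id] at hnil
        have hmn : PySem.List.min? ([] : List Nat) (fun r => r) = none :=
          (PySem.List.min?_eq_none_iff _ _).mpr rfl
        simp [hH, hM, hL, hnil, hmn]
      · -- low is the best rank: min = 2
        obtain ⟨q0, hq0⟩ := List.exists_mem_of_ne_nil _ hL
        have ⟨hq0p, hq0l⟩ := List.mem_filter.mp hq0
        have hmin : PySem.List.min? ((p31.map (pvB_rank [h, m, l])).filterMap id) (fun r => r) = some 2 := by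
          apply pv_min_eq
          · exact (pv_mem_ranks _ _ _).mpr ⟨q0, hq0p,
              by simp [pvB_rank_three, hnH q0 hq0p, hnM q0 hq0p, by simpa using hq0l]⟩
          · intro y hy
            obtain ⟨q, hq, hr⟩ := (pv_mem_ranks _ _ _).mp hy
            rw [pvB_rank_three] at hr
            by_cases h3 : q ∈ l <;> simp [hnH q hq, hnM q hq, h3] at hr
            omega
        simp only [List.filterMap_map, Function.comp, id] at hmin
        have hfil : ((p31.zip (p31.map (pvB_rank [h, m, l]))).filter
            (fun qr => qr.2 == some 2)).map Prod.fst =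
            p31.filter (fun qid => decide (qid ∈ l)) := by
          rw [pv_zip_filter]
          apply List.filter_congr
          intro q hq
          by_cases hql : q ∈ l <;> simp [pvB_rank_three, hnH q hq, hnM q hq, hql]
        simp [hH, hM, hL, hmin, hfil, List.getD]
    · -- medium is the best rank: min = 1
      obtain ⟨q0, hq0⟩ := List.exists_mem_of_ne_nil _ hM
      have ⟨hq0p, hq0m⟩ := List.mem_filter.mp hq0
      have hmin : PySem.List.min? ((p31.map (pvB_rank [h, m, l])).filterMap id) (fun r => r) = some 1 := by
        apply pv_min_eq
        · exact (pv_mem_ranks _ _ _).mpr ⟨q0, hq0p,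
            by simp [pvB_rank_three, hnH q0 hq0p, by simpa using hq0m]⟩
        · intro y hy
          obtain ⟨q, hq, hr⟩ := (pv_mem_ranks _ _ _).mp hy
          rw [pvB_rank_three] at hr
          by_cases h2 : q ∈ m <;> by_cases h3 : q ∈ l <;>
            simp [hnH q hq, h2, h3] at hr <;> omega
      simp only [List.filterMap_map, Function.comp, id] at hmin
      have hfil : ((p31.zip (p31.map (pvB_rank [h, m, l]))).filter
          (fun qr => qr.2 == some 1)).map Prod.fst =
          p31.filter (fun qid => decide (qid ∈ m)) := by
        rw [pv_zip_filter]
        apply List.filter_congr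
        intro q hq
        by_cases a2 : q ∈ m <;> by_cases a3 : q ∈ l <;>
          simp [pvB_rank_three, hnH q hq, a2, a3]
      simp [hH, hM, hmin, hfil, List.getD]
  · -- high is the best rank: min = 0
    obtain ⟨q0, hq0⟩ := List.exists_mem_of_ne_nil _ hH
    have ⟨hq0p, hq0h⟩ := List.mem_filter.mp hq0
    have hmin : PySem.List.min? ((p31.map (pvB_rank [h, m, l])).filterMap id) (fun r => r) = some 0 := by
      apply pv_min_eq
      · exact (pv_mem_ranks _ _ _).mpr ⟨q0, hq0p,
          by simp [pvB_rank_three, by simpa using hq0h]⟩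
      · intro y _; exact Nat.zero_le y
    simp only [List.filterMap_map, Function.comp, id] at hmin
    have hfil : ((p31.zip (p31.map (pvB_rank [h, m, l]))).filter
        (fun qr => qr.2 == some 0)).map Prod.fst =
        p31.filter (fun qid => decide (qid ∈ h)) := by
      rw [pv_zip_filter]
      apply List.filter_congr
      intro q hq
      by_cases a1 : q ∈ h <;> by_cases a2 : q ∈ m <;> by_cases a3 : q ∈ l <;>
        simp [pvB_rank_three, a1, a2, a3]
    simp [hH, hmin, hfil, List.getD]

-- ===== VERDICT =====
theorem get_priority_tier_py_spec : Claim_equal_get_priority_tier_py := by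
  intro p31_values spacy_label _
  unfold Spec_get_priority_tier_py get_priority_tier_py get_priority_tier_py_alt
  rw [pv_lookup_eq]
  cases h : pv_spacy_map.get? spacy_label with
  | none => rfl
  | some pm =>
    simp only [Option.map_some]
    exact pv_core (pm.getD "high" []) (pm.getD "medium" []) (pm.getD "low" []) p31_values
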